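-- pv_equiv track=rewrite | github.com/hannorein/rebound | docs/generate_python_docs.py | convert_code_blocks
-- ===== SOURCE A (Python) =====
-- def convert_code_blocks(doc):
--     new_doc = ""
--     lines = doc.split("\n")
--     first = True
--     for line in lines:
--         if first:
--             if line[:3]==">>>":
--                 first = False
--                 new_doc += "```python\n"
--                 new_doc += line[3:]+"\n"
--             else:
--                 new_doc += line+"\n"
--         else:
--             if line[:3]==">>>":
--                 new_doc += line[3:]+"\n"
--             else:
--                 new_doc += "```\n"
--                 new_doc += line+"\n"
--                 first = True
--     if first==False:
--         new_doc += "```\n"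
--
--     return new_doc
-- ===== SOURCE B (Python) =====
-- def convert_code_blocks(doc):
--     lines = doc.split("\n")
--     out = []
--     i = 0
--     n = len(lines)
--     while i < n:
--         if lines[i].startswith(">>>"):
--             out.append("```python\n")
--             while i < n and lines[i].startswith(">>>"):
--                 out.append(lines[i][3:] + "\n")
--                 i += 1
--             out.append("```\n")
--         else:
--             out.append(lines[i] + "\n")
--             i += 1
--     return "".join(out)
-- ===== Notes on version B (the rewrite author's own statement) =====
-- stated objective: idiomatic
-- what changed: Replaces A's boolean in-block flag state machine threaded through a single for-loop with a run-based scan: an inner loop consumes each maximal doctest run and emits the whole fenced block at once, collecting pieces in a list joined at the end.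
import Mathlib
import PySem

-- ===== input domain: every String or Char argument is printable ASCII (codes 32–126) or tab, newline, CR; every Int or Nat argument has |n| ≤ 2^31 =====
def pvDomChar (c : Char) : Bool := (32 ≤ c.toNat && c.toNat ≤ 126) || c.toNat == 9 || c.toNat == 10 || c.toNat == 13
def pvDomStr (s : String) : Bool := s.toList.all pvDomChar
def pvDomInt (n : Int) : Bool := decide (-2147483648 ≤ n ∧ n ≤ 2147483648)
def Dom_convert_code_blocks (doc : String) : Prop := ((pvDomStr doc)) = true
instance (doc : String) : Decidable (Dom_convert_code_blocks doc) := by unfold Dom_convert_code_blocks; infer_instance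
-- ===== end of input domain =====

-- B replaces A's boolean state machine with a run-based scan (inner loop per doctest run); same behaviour, no speed claim.

-- ===== PORT A =====
-- A's for-loop: fold over the lines with state (new_doc, first).
def pvStepA (st : List Char × Bool) (line : List Char) : List Char × Bool :=
  if st.2 then
    if PySem.List.slice line none (some 3) = ['>', '>', '>'] then
      (st.1 ++ "```python\n".toList ++ PySem.List.slice line (some 3) none ++ ['\n'], false)
    else
      (st.1 ++ line ++ ['\n'], true)
  else
    if PySem.List.slice line none (some 3) = ['>', '>', '>'] then
      (st.1 ++ PySem.List.slice line (some 3) none ++ ['\n'], false)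
    else
      (st.1 ++ "```\n".toList ++ line ++ ['\n'], true)

def convert_code_blocks (doc : String) : String :=
  let lines := PySem.Chars.splitOn doc.toList ['\n']
  let st := lines.foldl pvStepA ([], true)
  String.ofList (if st.2 = false then st.1 ++ "```\n".toList else st.1)

-- ===== PORT B =====
def pvIsCode (l : List Char) : Bool := PySem.Chars.startswith l ['>', '>', '>']

-- B's outer while-loop; the inner while over a maximal doctest run is takeWhile/dropWhile.
def pvAltGo : List (List Char) → List (List Char)
  | [] => []
  | l :: rest =>
    if pvIsCode l then
      "```python\n".toList ::
        ((l :: rest.takeWhile pvIsCode).map (fun x => PySem.List.slice x (some 3) none ++ ['\n']))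
        ++ ["```\n".toList] ++ pvAltGo (rest.dropWhile pvIsCode)
    else
      (l ++ ['\n']) :: pvAltGo rest
termination_by ls => ls.length
decreasing_by
  · simpa using Nat.lt_succ_of_le (rest.length_dropWhile_le pvIsCode)
  · simp

def convert_code_blocks_alt (doc : String) : String :=
  String.ofList (PySem.Chars.join [] (pvAltGo (PySem.Chars.splitOn doc.toList ['\n'])))

-- ===== PRECONDITION & SPEC =====
def Spec_convert_code_blocks (doc : String) (out : String) : Prop := out = convert_code_blocks_alt doc
instance (doc : String) (out : String) : Decidable (Spec_convert_code_blocks doc out) := by unfold Spec_convert_code_blocks; infer_instance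

-- ===== CLAIM (what is proved, stated in full; the proofs are below) =====
def Claim_equal_convert_code_blocks : Prop := ∀ (doc : String), Dom_convert_code_blocks doc → Spec_convert_code_blocks doc (convert_code_blocks doc)

-- ===== LEMMAS AND PROOFS =====

-- A tests a 3-character slice prefix; B uses startswith: the two predicates coincide.
theorem pvPred_eq (l : List Char) :
    (PySem.List.slice l none (some 3) = ['>', '>', '>']) ↔ pvIsCode l = true := by
  rw [pvIsCode, PySem.Chars.startswith_iff, List.prefix_iff_eq_take,
    show PySem.List.slice l none (some 3) = l.take 3 from PySem.List.slice_to l (by norm_num)]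
  constructor <;> (intro h; simpa using h.symm)

theorem pvJoin_nil_cons (x : List Char) (xs : List (List Char)) :
    PySem.Chars.join [] (x :: xs) = x ++ PySem.Chars.join [] xs := by
  cases xs with
  | nil => simp [PySem.Chars.join_singleton, PySem.Chars.join_nil]
  | cons y ys => rw [PySem.Chars.join_cons_cons]; simp

theorem pvJoin_nil_append (xs ys : List (List Char)) :
    PySem.Chars.join [] (xs ++ ys) = PySem.Chars.join [] xs ++ PySem.Chars.join [] ys := by
  induction xs with
  | nil => simp [PySem.Chars.join_nil]
  | cons x t ih => simp [pvJoin_nil_cons, ih]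

-- Core invariant: A's fold (plus its final fence fix-up) equals B's run-based output,
-- in both states of A's boolean flag.
theorem pvMain (lines : List (List Char)) :
    (∀ nd : List Char,
      (fun st : List Char × Bool => if st.2 = false then st.1 ++ "```\n".toList else st.1)
        (lines.foldl pvStepA (nd, true))
        = nd ++ PySem.Chars.join [] (pvAltGo lines))
    ∧ (∀ nd : List Char,
      (fun st : List Char × Bool => if st.2 = false then st.1 ++ "```\n".toList else st.1)
        (lines.foldl pvStepA (nd, false))
        = nd ++ PySem.Chars.join []
            ((lines.takeWhile pvIsCode).map (fun x => PySem.List.slice x (some 3) none ++ ['\n']))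
          ++ "```\n".toList
          ++ PySem.Chars.join [] (pvAltGo (lines.dropWhile pvIsCode))) := by
  induction lines with
  | nil =>
    constructor <;> intro nd <;> simp [pvAltGo, PySem.Chars.join_nil]
  | cons l rest ih =>
    obtain ⟨ih1, ih2⟩ := ih
    by_cases hc : pvIsCode l = true
    · constructor <;> intro nd
      · rw [List.foldl_cons, show pvStepA (nd, true) l
            = (nd ++ "```python\n".toList ++ PySem.List.slice l (some 3) none ++ ['\n'], false) from by
              simp [pvStepA, (pvPred_eq l).2 hc],
          ih2, pvAltGo]
        simp [hc, pvJoin_nil_cons, pvJoin_nil_append, List.map_cons]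
      · rw [List.foldl_cons, show pvStepA (nd, false) l
            = (nd ++ PySem.List.slice l (some 3) none ++ ['\n'], false) from by
              simp [pvStepA, (pvPred_eq l).2 hc],
          ih2, List.takeWhile_cons_of_pos hc, List.dropWhile_cons_of_pos hc]
        simp [pvJoin_nil_cons, List.map_cons]
    · have hc' : ¬ PySem.List.slice l none (some 3) = ['>', '>', '>'] := fun h => hc ((pvPred_eq l).1 h)
      constructor <;> intro nd
      · rw [List.foldl_cons, show pvStepA (nd, true) l = (nd ++ l ++ ['\n'], true) from by
            simp [pvStepA, hc'], ih1, pvAltGo]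
        simp [hc, pvJoin_nil_cons]
      · rw [List.foldl_cons, show pvStepA (nd, false) l
            = (nd ++ "```\n".toList ++ l ++ ['\n'], true) from by simp [pvStepA, hc'],
          ih1, List.takeWhile_cons_of_neg hc, List.dropWhile_cons_of_neg hc, pvAltGo]
        simp [hc, pvJoin_nil_cons]

-- ===== VERDICT (by name: the statement is the Claim_ definition above) =====
theorem convert_code_blocks_spec : Claim_equal_convert_code_blocks := by
  intro doc _
  unfold Spec_convert_code_blocks convert_code_blocks convert_code_blocks_alt
  have h := (pvMain (PySem.Chars.splitOn doc.toList ['\n'])).1 []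
  simp only [List.nil_append] at h
  simp only [h]
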